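-- pv_equiv track=rewrite | github.com/Yuqing-Gao/Bachelors-Thesis | code/test.py | w1_calculation
-- ===== SOURCE A (Python) =====
-- def w1_calculation(lst):
--     total_sum = 0
--     for k in range(len(lst) - 1):
--         inner_sum = 0
--         for j in range(len(lst) - 1):
--             inner_sum += lst[k] - lst[j]
--         total_sum += (lst[k + 1] - lst[k]) * inner_sum
--     return total_sum
-- ===== SOURCE B (Python) =====
-- def w1_calculation(lst):
--     m = len(lst) - 1
--     s = sum(lst[:-1])
--     total = 0
--     for k in range(m):
--         total += (lst[k + 1] - lst[k]) * (m * lst[k] - s)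
--     return total
-- ===== Notes on version B (the rewrite author's own statement) =====
-- stated objective: faster
-- what changed: Replaced the O(n^2) inner loop with a precomputed constant (sum of the first n-1 elements), so the inner sum becomes the closed form (n-1)*lst[k]-S and one linear pass suffices.
import Mathlib
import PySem

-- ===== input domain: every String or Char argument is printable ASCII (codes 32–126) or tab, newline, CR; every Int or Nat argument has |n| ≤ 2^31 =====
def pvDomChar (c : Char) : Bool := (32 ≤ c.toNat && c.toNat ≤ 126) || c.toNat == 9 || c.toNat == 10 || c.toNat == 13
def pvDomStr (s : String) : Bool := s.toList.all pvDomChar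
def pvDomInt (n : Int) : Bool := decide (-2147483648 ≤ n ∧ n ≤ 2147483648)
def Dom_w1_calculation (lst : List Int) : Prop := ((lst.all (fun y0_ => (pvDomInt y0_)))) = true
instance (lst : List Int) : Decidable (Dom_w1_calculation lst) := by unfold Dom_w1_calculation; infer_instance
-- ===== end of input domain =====

-- B precomputes the constant inner sum once, turning A's quadratic nested loops into a single linear pass.
-- ===== PORT A =====
def w1_calculation (lst : List Int) : Int :=
  (PySem.List.pyRange 0 ((lst.length : Int) - 1) 1).foldl
    (fun total_sum k =>
      let inner_sum :=
        (PySem.List.pyRange 0 ((lst.length : Int) - 1) 1).foldl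
          (fun inner j => inner + (PySem.List.pyGetD lst k 0 - PySem.List.pyGetD lst j 0)) 0
      total_sum + (PySem.List.pyGetD lst (k + 1) 0 - PySem.List.pyGetD lst k 0) * inner_sum) 0

-- ===== PORT B =====
def w1_calculation_alt (lst : List Int) : Int :=
  let m : Int := (lst.length : Int) - 1
  let s : Int := (PySem.List.slice lst none (some (-1))).sum
  (PySem.List.pyRange 0 m 1).foldl
    (fun total k =>
      total + (PySem.List.pyGetD lst (k + 1) 0 - PySem.List.pyGetD lst k 0)
        * (m * PySem.List.pyGetD lst k 0 - s)) 0

-- ===== PRECONDITION & SPEC =====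
def Spec_w1_calculation (lst : List Int) (out : Int) : Prop := out = w1_calculation_alt lst
instance (lst : List Int) (out : Int) : Decidable (Spec_w1_calculation lst out) := by unfold Spec_w1_calculation; infer_instance

-- ===== CLAIM (what is proved, stated in full; the proofs are below) =====
def Claim_equal_w1_calculation : Prop := ∀ (lst : List Int), Dom_w1_calculation lst → Spec_w1_calculation lst (w1_calculation lst)

-- ===== LEMMAS AND PROOFS =====

-- a fold subtracting each element from a running total has this closed form
lemma foldl_sub_closed (ys : List Int) (c a : Int) :
    ys.foldl (fun s x => s + (c - x)) a = a + (ys.length : Int) * c - ys.sum := by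
  induction ys generalizing a with
  | nil => simp
  | cons y t ih => simp [List.foldl_cons, ih]; ring

-- the inner loop of A equals its closed form (n-1)*c - sum(lst[:-1]) for nonempty lst
lemma inner_closed (lst : List Int) (h : lst ≠ []) (c : Int) :
    (PySem.List.pyRange 0 ((lst.length : Int) - 1) 1).foldl
      (fun inner j => inner + (c - PySem.List.pyGetD lst j 0)) 0
    = ((lst.length : Int) - 1) * c - lst.dropLast.sum := by
  have hlen : (lst.length : Int) - 1 = (lst.dropLast.length : Int) := by
    have : 1 ≤ lst.length := List.length_pos_of_ne_nil h
    simp [List.length_dropLast]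
    omega
  rw [hlen]
  have hcongr :
      (PySem.List.pyRange 0 ((lst.dropLast.length : Int)) 1).foldl
        (fun inner j => inner + (c - PySem.List.pyGetD lst j 0)) 0
      = (PySem.List.pyRange 0 ((lst.dropLast.length : Int)) 1).foldl
        (fun inner j => inner + (c - PySem.List.pyGetD lst.dropLast j 0)) 0 := by
    apply PySem.List.foldl_congr_mem
    intro acc j hj
    have hj' := (PySem.List.mem_pyRange_one).1 hj
    have h0 : 0 ≤ j := hj'.1
    have h1 : j < (lst.dropLast.length : Int) := hj'.2
    rw [PySem.List.pyGetD_eq_getElem lst 0 h0 (by simp [List.length_dropLast] at h1 ⊢; omega),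
        PySem.List.pyGetD_eq_getElem lst.dropLast 0 h0 (by omega)]
    simp [List.getElem_dropLast]
  rw [hcongr, PySem.List.foldl_pyRange_zero_pyGetD' lst.dropLast 0
        (fun inner x => inner + (c - x)) 0, foldl_sub_closed]
  ring

-- ===== VERDICT (by name: the statement is the Claim_ definition above) =====
theorem w1_calculation_spec : Claim_equal_w1_calculation := by
  intro lst _
  unfold Spec_w1_calculation w1_calculation w1_calculation_alt
  rcases eq_or_ne lst [] with rfl | h
  · decide
  · simp only [PySem.List.slice_to_neg_one]
    apply PySem.List.foldl_congr_mem
    intro total k _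
    rw [inner_closed lst h (PySem.List.pyGetD lst k 0)]
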